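-- pv_equiv track=rewrite | github.com/KantiCodes/chess-raspberrypi | src/chessboard_utills.py | one_hot_wbe
-- ===== SOURCE A (Python) =====
-- def one_hot_wbe(int_notation):
--     """For neural network input of 8x8 board we have 64 inputs, each of them is a single chessboard tile with either of the values - 'W"(1), 'E'(0), 'B'(-1)
--     This function converts the 64 input numbers 192 neuron representation where:
--      - first 64 neurons represent one hot encoded white pieces
--      - next 64 neurons represent one hot encoded 'empty' places
--      - last 64 neurons represent one hot encoded black pieces
--     """
--     white = []
--     empty = []
--     black = []
--     for id in range(len(int_notation)):
--         if int_notation[id] == 1: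
--             white.append(1)
--             empty.append(0)
--             black.append(0)
--         elif int_notation[id] == -1:
--             white.append(0)
--             empty.append(0)
--             black.append(1)
--         else:
--             white.append(0)
--             empty.append(1)
--             black.append(0)
--
--     for w, e, b in zip(white, empty, black):
--         assert w + e + b == 1, f"WBE encoidng failed, w: {w}, e: {e}, b: {b}"
--     return white, empty, black
-- ===== SOURCE B (Python) =====
-- def one_hot_wbe(int_notation):
--     """Same encoding as A, as three independent comprehensions; the assert
--     loop is dropped (each position yields exactly one 1, so it never fires)."""
--     white = [1 if x == 1 else 0 for x in int_notation]
--     black = [1 if x == -1 else 0 for x in int_notation]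
--     empty = [1 - w - b for w, b in zip(white, black)]
--     return white, empty, black
-- ===== Notes on version B (the rewrite author's own statement) =====
-- stated objective: simpler
-- what changed: Replaces the single fused append loop (plus a redundant assert pass) with three independent per-position comprehensions: white and black directly from the value, empty as 1-w-b from the other two.
import Mathlib
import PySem

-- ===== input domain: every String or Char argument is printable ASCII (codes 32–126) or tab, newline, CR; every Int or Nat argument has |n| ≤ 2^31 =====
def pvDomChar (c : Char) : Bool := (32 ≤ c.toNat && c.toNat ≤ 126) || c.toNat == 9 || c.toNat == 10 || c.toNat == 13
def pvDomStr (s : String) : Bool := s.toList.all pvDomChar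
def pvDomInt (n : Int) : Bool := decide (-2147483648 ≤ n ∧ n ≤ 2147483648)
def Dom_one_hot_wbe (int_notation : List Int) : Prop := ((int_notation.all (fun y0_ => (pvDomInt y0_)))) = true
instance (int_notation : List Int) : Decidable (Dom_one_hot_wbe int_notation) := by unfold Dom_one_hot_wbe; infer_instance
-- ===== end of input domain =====

-- B replaces A's fused append loop (and its redundant assert pass) with three
-- independent per-position comprehensions; objective: simpler.

-- ===== PORT A =====
-- A's fused loop body: the if/elif/else appending to the three accumulators
def pvStepA (acc : List Int × List Int × List Int) (v : Int) : List Int × List Int × List Int :=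
  if v = 1 then (acc.1 ++ [1], acc.2.1 ++ [0], acc.2.2 ++ [0])
  else if v = -1 then (acc.1 ++ [0], acc.2.1 ++ [0], acc.2.2 ++ [1])
  else (acc.1 ++ [0], acc.2.1 ++ [1], acc.2.2 ++ [0])

-- A's loop over range(len(int_notation)); int_notation[id] is always in range, so
-- pyGetD with default 0 is exact here; the assert pass never fires (w+e+b = 1 at
-- every position), so the port returns the triple.
def one_hot_wbe (int_notation : List Int) : List Int × List Int × List Int :=
  (PySem.List.pyRange 0 (int_notation.length) 1).foldl
    (fun acc id => pvStepA acc (PySem.List.pyGetD int_notation id 0))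
    ([], [], [])

-- ===== PORT B =====
def one_hot_wbe_alt (int_notation : List Int) : List Int × List Int × List Int :=
  let white := int_notation.map (fun x => if x = 1 then (1 : Int) else 0)
  let black := int_notation.map (fun x => if x = -1 then (1 : Int) else 0)
  let empty := (white.zip black).map (fun wb => 1 - wb.1 - wb.2)
  (white, empty, black)

-- ===== PRECONDITION & SPEC =====
def Spec_one_hot_wbe (int_notation : List Int) (out : List Int × List Int × List Int) : Prop := out = one_hot_wbe_alt int_notation
instance (int_notation : List Int) (out : List Int × List Int × List Int) : Decidable (Spec_one_hot_wbe int_notation out) := by unfold Spec_one_hot_wbe; infer_instance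

-- ===== CLAIM (what is proved, stated in full; the proofs are below) =====
def Claim_equal_one_hot_wbe : Prop := ∀ (int_notation : List Int), Dom_one_hot_wbe int_notation → Spec_one_hot_wbe int_notation (one_hot_wbe int_notation)

-- ===== LEMMAS AND PROOFS =====

-- A's loop after the pyRange/pyGetD bridge: the element-wise foldl, started from any
-- accumulator, appends the three pointwise maps.
theorem pvA_loop (l : List Int) (acc : List Int × List Int × List Int) :
    l.foldl pvStepA acc =
      (acc.1 ++ l.map (fun x => if x = 1 then (1 : Int) else 0),
       acc.2.1 ++ l.map (fun x => if x = 1 then (0 : Int) else if x = -1 then 0 else 1),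
       acc.2.2 ++ l.map (fun x => if x = -1 then (1 : Int) else 0)) := by
  induction l generalizing acc with
  | nil => simp
  | cons v t ih =>
    simp only [List.foldl_cons, List.map_cons]
    by_cases h1 : v = 1
    · rw [show pvStepA acc v = (acc.1 ++ [1], acc.2.1 ++ [0], acc.2.2 ++ [0]) from by
        simp [pvStepA, h1], ih]
      simp [h1]
    · by_cases h2 : v = -1
      · rw [show pvStepA acc v = (acc.1 ++ [0], acc.2.1 ++ [0], acc.2.2 ++ [1]) from by
          simp [pvStepA, h2], ih]
        simp [h2]
      · rw [show pvStepA acc v = (acc.1 ++ [0], acc.2.1 ++ [1], acc.2.2 ++ [0]) from by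
          simp [pvStepA, h1, h2], ih]
        simp [h1, h2]

-- B's empty list (pointwise 1 - w - b) equals A's else-encoding
theorem pvEmpty_eq (l : List Int) :
    ((l.map (fun x => if x = 1 then (1 : Int) else 0)).zip
      (l.map (fun x => if x = -1 then (1 : Int) else 0))).map (fun wb => 1 - wb.1 - wb.2)
    = l.map (fun x => if x = 1 then (0 : Int) else if x = -1 then 0 else 1) := by
  induction l with
  | nil => rfl
  | cons v t ih =>
    simp only [List.map_cons, List.zip_cons_cons, ih]
    split_ifs with h1 h2 <;> first | omega | norm_num

-- ===== VERDICT (by name: the statement is the Claim_ definition above) =====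
theorem one_hot_wbe_spec : Claim_equal_one_hot_wbe := by
  intro l _
  unfold Spec_one_hot_wbe one_hot_wbe one_hot_wbe_alt
  simp only []
  rw [show ((l.length : Int)) = PySem.List.len l from rfl,
      PySem.List.foldl_pyRange_zero_pyGetD (f := pvStepA) (xs := l) (d := 0)
        (init := (([], [], []) : List Int × List Int × List Int)),
      pvA_loop, pvEmpty_eq]
  simp
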